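-- pv_equiv track=rewrite | github.com/batumoglu/Python_Algorithms | Codility/PrefixSum.py | slow_solution
-- ===== SOURCE A (Python) =====
-- def slow_solution(A, k, m):
--     n = len(A)
--     result = 0
--     # First right, then left
--     for p in range(min(m+1, n-k)):
--         right_pos = k+p
--         left_pos = max(0, min(k, k-m+2*p))
--         result = max(result, sum(A[left_pos: right_pos+1]))
--     # First left, then right
--     for p in range(min(m,k)+1):
--         left_pos = k-p
--         right_pos = min(n-1, max(k, k+m-2*p))
--         result = max(result, sum(A[left_pos: right_pos+1]))
--     return result
-- ===== SOURCE B (Python) =====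
-- def slow_solution(A, k, m):
--     # Prefix sums: each candidate window sum is O(1) instead of re-summing the slice.
--     n = len(A)
--     P = [0]
--     s = 0
--     for x in A:
--         s += x
--         P.append(s)
--
--     def wsum(l, b):
--         # sum(A[l:b]) for l >= 0, with Python slice clamping (b may be negative).
--         e = b if b >= 0 else n + b
--         e = min(max(e, 0), n)
--         s2 = min(max(l, 0), n)
--         return P[e] - P[s2] if e > s2 else 0
--
--     best = 0
--     for p in range(min(m + 1, n - k)):
--         best = max(best, wsum(max(0, min(k, k - m + 2 * p)), k + p + 1))
--     for p in range(min(m, k) + 1):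
--         best = max(best, wsum(k - p, min(n - 1, max(k, k + m - 2 * p)) + 1))
--     return best
-- ===== Notes on version B (the rewrite author's own statement) =====
-- stated objective: faster
-- what changed: B precomputes a prefix-sum array once and evaluates each candidate window sum in O(1) instead of re-summing the slice inside both loops.
import Mathlib
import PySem

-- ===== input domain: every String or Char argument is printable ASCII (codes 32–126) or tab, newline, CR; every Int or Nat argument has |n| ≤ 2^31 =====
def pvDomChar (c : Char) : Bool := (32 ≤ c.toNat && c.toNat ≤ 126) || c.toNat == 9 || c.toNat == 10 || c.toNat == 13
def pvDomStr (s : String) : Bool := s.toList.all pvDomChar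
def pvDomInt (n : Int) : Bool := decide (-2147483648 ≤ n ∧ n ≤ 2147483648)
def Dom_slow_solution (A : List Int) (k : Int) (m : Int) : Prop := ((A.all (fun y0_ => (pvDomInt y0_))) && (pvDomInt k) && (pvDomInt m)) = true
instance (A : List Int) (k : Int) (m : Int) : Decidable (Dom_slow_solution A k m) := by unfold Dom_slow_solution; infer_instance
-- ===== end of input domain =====

-- B replaces the per-window slice re-summation by a prefix-sum array with O(1) window sums.

-- ===== PORT A =====
def slow_solution (A : List Int) (k : Int) (m : Int) : Int :=
  let n : Int := A.length
  let result : Int := 0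
  let result := (PySem.List.pyRange 0 (min (m+1) (n-k)) 1).foldl (fun result p =>
    let right_pos := k + p
    let left_pos := max 0 (min k (k - m + 2*p))
    max result (PySem.List.slice A (some left_pos) (some (right_pos+1))).sum) result
  let result := (PySem.List.pyRange 0 (min m k + 1) 1).foldl (fun result p =>
    let left_pos := k - p
    let right_pos := min (n-1) (max k (k + m - 2*p))
    max result (PySem.List.slice A (some left_pos) (some (right_pos+1))).sum) result
  result

-- ===== PORT B =====
-- one step of B's prefix-sum building loop: state (P, s)
def pvPrefixStep : (List Int × Int) → Int → (List Int × Int) :=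
  fun Ps x => (Ps.1 ++ [Ps.2 + x], Ps.2 + x)

-- B's wsum helper: sum(A[l:b]) for l ≥ 0 via the prefix array, with Python slice clamping
def pvWsum (P : List Int) (n l b : Int) : Int :=
  let e0 := if 0 ≤ b then b else n + b
  let e := min (max e0 0) n
  let s2 := min (max l 0) n
  if s2 < e then PySem.List.pyGetD P e 0 - PySem.List.pyGetD P s2 0 else 0

def slow_solution_alt (A : List Int) (k : Int) (m : Int) : Int :=
  let n : Int := A.length
  let P := (A.foldl pvPrefixStep ([0], 0)).1
  let best : Int := 0
  let best := (PySem.List.pyRange 0 (min (m+1) (n-k)) 1).foldl (fun best p =>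
    max best (pvWsum P n (max 0 (min k (k - m + 2*p))) (k + p + 1))) best
  let best := (PySem.List.pyRange 0 (min m k + 1) 1).foldl (fun best p =>
    max best (pvWsum P n (k - p) (min (n-1) (max k (k + m - 2*p)) + 1))) best
  best

-- ===== PRECONDITION & SPEC =====
def Spec_slow_solution (A : List Int) (k : Int) (m : Int) (out : Int) : Prop := out = slow_solution_alt A k m
instance (A : List Int) (k : Int) (m : Int) (out : Int) : Decidable (Spec_slow_solution A k m out) := by unfold Spec_slow_solution; infer_instance

-- ===== CLAIM (what is proved, stated in full; the proofs are below) =====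
def Claim_equal_slow_solution : Prop := ∀ (A : List Int) (k : Int) (m : Int), Dom_slow_solution A k m → Spec_slow_solution A k m (slow_solution A k m)

-- ===== LEMMAS AND PROOFS =====

theorem pvPrefix_fold (A : List Int) (P0 : List Int) (s0 : Int) :
    A.foldl pvPrefixStep (P0, s0)
      = (P0 ++ (List.range A.length).map (fun i => s0 + (A.take (i+1)).sum), s0 + A.sum) := by
  induction A generalizing P0 s0 with
  | nil => simp
  | cons x t ih =>
    simp only [List.foldl_cons, pvPrefixStep, List.length_cons, List.sum_cons]
    rw [ih]
    simp only [Prod.mk.injEq]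
    constructor
    · rw [List.range_succ_eq_map, List.map_cons, List.map_map, List.append_assoc]
      simp [Function.comp_def, List.take_succ_cons, add_assoc]
    · ring

theorem pvPrefix_eq (A : List Int) :
    (A.foldl pvPrefixStep ([0], 0)).1
      = (List.range (A.length + 1)).map (fun i => (A.take i).sum) := by
  rw [pvPrefix_fold, List.range_succ_eq_map, List.map_cons, List.map_map]
  simp [Function.comp_def]

theorem pvPrefix_get (A : List Int) (i : Int) (h0 : 0 ≤ i) (hn : i ≤ (A.length : Int)) :
    PySem.List.pyGetD ((A.foldl pvPrefixStep ([0], 0)).1) i 0 = (A.take i.toNat).sum := by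
  rw [pvPrefix_eq, PySem.List.pyGetD_of_nonneg _ _ h0]
  have hi : i.toNat < A.length + 1 := by omega
  rw [List.getD_eq_getElem?_getD]
  simp [hi]

theorem pvSlice_sum (A : List Int) (l b : Int) (hl : 0 ≤ l) :
    (PySem.List.slice A (some l) (some b)).sum
      = pvWsum ((A.foldl pvPrefixStep ([0], 0)).1) (A.length : Int) l b := by
  have hcl : PySem.List.clampIdx A.length l = min l.toNat A.length := by
    simp [PySem.List.clampIdx]; omega
  set n := A.length with hn
  set a' : Nat := min l.toNat n with ha'
  set b' : Nat := PySem.List.clampIdx n b with hb'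
  have hb'le : b' ≤ n := by simp [hb', PySem.List.clampIdx]; split_ifs <;> omega
  have ha'le : a' ≤ n := by omega
  have hslice : PySem.List.slice A (some l) (some b) = (A.drop a').take (b' - a') := by
    simp only [PySem.List.slice]
    rw [← hn, hcl]
  -- the Int-side clamps in pvWsum coincide with a' and b'
  have he : min (max (if 0 ≤ b then b else (n : Int) + b) 0) (n : Int) = (b' : Int) := by
    simp [hb', PySem.List.clampIdx]
    split_ifs <;> omega
  have hs : min (max l 0) (n : Int) = (a' : Int) := by omega
  rw [hslice]
  unfold pvWsum
  simp only [he, hs]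
  by_cases hab : a' < b'
  · rw [if_pos (by exact_mod_cast hab)]
    rw [pvPrefix_get A _ (by positivity) (by exact_mod_cast hb'le),
        pvPrefix_get A _ (by positivity) (by exact_mod_cast ha'le)]
    have : A.take b' = A.take a' ++ (A.drop a').take (b' - a') := by
      rw [← List.take_add]
      congr 1
      omega
    simp only [Int.toNat_natCast]
    rw [this, List.sum_append]
    ring
  · rw [if_neg (by exact_mod_cast hab)]
    have : b' - a' = 0 := by omega
    simp [this]

-- ===== VERDICT =====
theorem slow_solution_spec : Claim_equal_slow_solution := by
  intro A k m _
  unfold Spec_slow_solution slow_solution slow_solution_alt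
  simp only []
  have h1 : (PySem.List.pyRange 0 (min (m+1) ((A.length:Int)-k)) 1).foldl (fun result p =>
      max result (PySem.List.slice A (some (max 0 (min k (k - m + 2*p)))) (some (k + p + 1))).sum) 0
    = (PySem.List.pyRange 0 (min (m+1) ((A.length:Int)-k)) 1).foldl (fun best p =>
      max best (pvWsum ((A.foldl pvPrefixStep ([0],0)).1) ((A.length:Int)) (max 0 (min k (k - m + 2*p))) (k + p + 1))) 0 := by
    apply PySem.List.foldl_congr_mem
    intro acc p _
    rw [pvSlice_sum A _ _ (le_max_left _ _)]
  rw [h1]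
  apply PySem.List.foldl_congr_mem
  intro acc p hp
  rw [PySem.List.mem_pyRange_one] at hp
  rw [pvSlice_sum A _ _ (by omega)]
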